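-- pv_equiv track=rewrite | github.com/TrucNgoc11/DSA | BigOCoding/Stack_Queue/Compilers_and_Parsers.py | helper
-- ===== SOURCE A (Python) =====
-- def helper(expression):
-- 	st = []
-- 	ans = 0
-- 	for i in range(len(expression)):
-- 		if expression[i] == "<":
-- 			st.append(expression[i])
-- 		elif len(st) == 0:
-- 			break
-- 		else:
-- 			st.pop()
-- 			if len(st) == 0:
-- 				ans = i + 1
-- 	return ans
-- ===== SOURCE B (Python) =====
-- def helper(expression):
--     # pass 1: cumulative balances (+1 for '<', -1 otherwise)
--     balances = []
--     b = 0
--     for ch in expression: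
--         b += 1 if ch == "<" else -1
--         balances.append(b)
--     # pass 2: cutoff = first index where balance goes negative, else len
--     cutoff = len(expression)
--     for i in range(len(balances)):
--         if balances[i] < 0:
--             cutoff = i
--             break
--     # pass 3: largest 1-based position < cutoff+1 with balance zero
--     ans = 0
--     for i in range(cutoff):
--         if balances[i] == 0:
--             ans = i + 1
--     return ans
-- ===== Notes on version B (the rewrite author's own statement) =====
-- stated objective: alternative
-- what changed: Replaces A's single stack-driven loop (push/pop with break and in-loop answer updates) by three separate passes: build the cumulative-balance table, locate the first index where the balance turns negative (the cutoff), then scan the table up to the cutoff for the last 1-based position with balance zero.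
import Mathlib
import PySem

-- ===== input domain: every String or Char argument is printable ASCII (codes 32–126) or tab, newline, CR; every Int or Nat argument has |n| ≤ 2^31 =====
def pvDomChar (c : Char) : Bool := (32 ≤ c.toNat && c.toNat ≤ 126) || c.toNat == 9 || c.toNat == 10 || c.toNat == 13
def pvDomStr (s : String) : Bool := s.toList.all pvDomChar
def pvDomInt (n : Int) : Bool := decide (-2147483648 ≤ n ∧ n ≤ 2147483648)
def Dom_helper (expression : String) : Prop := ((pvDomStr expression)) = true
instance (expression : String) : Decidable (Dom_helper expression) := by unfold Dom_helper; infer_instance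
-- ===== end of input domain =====

-- B replaces A's single stack loop with three passes (build cumulative balances,
-- find the first-negative cutoff, scan for the last zero before it); same cost, alternative decomposition.

-- ===== PORT A =====
-- A's loop: stack st, answer ans, index i over the characters; 'break' = return ans.
def helperLoopA : List Char → Int → List Char → Int → Int
  | [], _, _, ans => ans
  | c :: rest, i, st, ans =>
    if c = '<' then helperLoopA rest (i + 1) (st ++ [c]) ans
    else if st.length = 0 then ans
    else
      let st' := st.dropLast
      if st'.length = 0 then helperLoopA rest (i + 1) st' (i + 1)
      else helperLoopA rest (i + 1) st' ans

def helper (expression : String) : Int := helperLoopA expression.toList 0 [] 0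

-- ===== PORT B =====
-- pass 1: cumulative balances
def pvBalances : List Char → Int → List Int
  | [], _ => []
  | c :: rest, b =>
    let b' := b + (if c = '<' then 1 else -1)
    b' :: pvBalances rest b'

-- pass 2: first absolute index (starting at i) with a negative balance, else dflt
def pvCutoff : List Int → Int → Int → Int
  | [], _, dflt => dflt
  | v :: rest, i, dflt => if v < 0 then i else pvCutoff rest (i + 1) dflt

-- pass 3: for i in range(cutoff): if balances[i] == 0: ans = i + 1
def pvScan : List Int → Int → Int → Int → Int
  | [], _, _, ans => ans
  | v :: rest, i, cutoff, ans =>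
    if i < cutoff then
      if v = 0 then pvScan rest (i + 1) cutoff (i + 1)
      else pvScan rest (i + 1) cutoff ans
    else ans

def helper_alt (expression : String) : Int :=
  let bal := pvBalances expression.toList 0
  let cutoff := pvCutoff bal 0 (expression.toList.length : Int)
  pvScan bal 0 cutoff 0

-- ===== PRECONDITION & SPEC =====
def Spec_helper (expression : String) (out : Int) : Prop := out = helper_alt expression
instance (expression : String) (out : Int) : Decidable (Spec_helper expression out) := by unfold Spec_helper; infer_instance

-- ===== CLAIM (what is proved, stated in full; the proofs are below) =====
def Claim_equal_helper : Prop := ∀ (expression : String), Dom_helper expression → Spec_helper expression (helper expression)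

-- ===== LEMMAS AND PROOFS =====

-- common abstract loop: balance b instead of a stack
def pvG : List Char → Int → Int → Int → Int
  | [], _, _, ans => ans
  | c :: rest, i, b, ans =>
    if c = '<' then pvG rest (i + 1) (b + 1) ans
    else if b = 0 then ans
    else if b - 1 = 0 then pvG rest (i + 1) (b - 1) (i + 1)
    else pvG rest (i + 1) (b - 1) ans

theorem helperLoopA_eq_pvG (cs : List Char) : ∀ (i : Int) (st : List Char) (ans : Int),
    helperLoopA cs i st ans = pvG cs i (st.length : Int) ans := by
  induction cs with
  | nil => intro i st ans; rfl
  | cons c rest ih =>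
    intro i st ans
    by_cases hc : c = '<'
    · simp only [helperLoopA, pvG, if_pos hc, ih]
      norm_num
    · cases st with
      | nil => simp [helperLoopA, pvG, hc]
      | cons x xs =>
        have hne : (x :: xs).length ≠ 0 := by simp
        have hneZ : ((x :: xs).length : Int) ≠ 0 := by exact_mod_cast hne
        have hdl : (x :: xs).dropLast.length = xs.length := by
          simp [List.length_dropLast]
        have hcast : ((x :: xs).dropLast.length : Int) = ((x :: xs).length : Int) - 1 := by
          rw [hdl]; push_cast [List.length_cons]; ring
        simp only [helperLoopA, pvG, if_neg hc, if_neg hne, if_neg hneZ]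
        by_cases hz : xs.length = 0
        · have hzN : (x :: xs).dropLast.length = 0 := by rw [hdl]; exact hz
          have hzZ : ((x :: xs).length : Int) - 1 = 0 := by rw [← hcast, hzN]; rfl
          rw [if_pos hzN, if_pos hzZ, ih, hcast, hzZ]
        · have hzN : (x :: xs).dropLast.length ≠ 0 := by rw [hdl]; exact hz
          have hzZ : ((x :: xs).length : Int) - 1 ≠ 0 := by
            rw [← hcast]; exact_mod_cast hzN
          rw [if_neg hzN, if_neg hzZ, ih, hcast]

theorem pvCutoff_ge (l : List Int) : ∀ (i : Int), i ≤ pvCutoff l i (i + (l.length : Int)) := by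
  induction l with
  | nil => intro i; simp [pvCutoff]
  | cons v rest ih =>
    intro i
    simp only [pvCutoff]
    split_ifs with hv
    · exact le_refl i
    · have h : i + ((v :: rest).length : Int) = (i + 1) + (rest.length : Int) := by
        push_cast [List.length_cons]; ring
      rw [h]
      exact le_trans (by omega) (ih (i + 1))

theorem pvBalances_length (cs : List Char) (b : Int) : (pvBalances cs b).length = cs.length := by
  induction cs generalizing b with
  | nil => rfl
  | cons c rest ih => simp [pvBalances, ih]

theorem altSide_eq_pvG (cs : List Char) : ∀ (i b ans : Int), 0 ≤ b →
    pvScan (pvBalances cs b) i (pvCutoff (pvBalances cs b) i (i + (cs.length : Int))) ans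
      = pvG cs i b ans := by
  induction cs with
  | nil => intro i b ans _; rfl
  | cons c rest ih =>
    intro i b ans hb
    simp only [pvBalances]
    set b' := b + (if c = '<' then 1 else -1) with hb'
    have hdflt : i + ((c :: rest).length : Int) = (i + 1) + (rest.length : Int) := by
      push_cast [List.length_cons]; ring
    by_cases hc : c = '<'
    · have hb1 : b' = b + 1 := by rw [hb', if_pos hc]
      have hpos : ¬ b' < 0 := by omega
      have hne : b' ≠ 0 := by omega
      have hcut : i + 1 ≤ pvCutoff (pvBalances rest b') (i + 1)
          ((i + 1) + (rest.length : Int)) := by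
        have := pvCutoff_ge (pvBalances rest b') (i + 1)
        rwa [pvBalances_length] at this
      rw [show (pvCutoff (b' :: pvBalances rest b') i (i + ((c :: rest).length : Int)))
            = pvCutoff (pvBalances rest b') (i + 1) ((i + 1) + (rest.length : Int)) from by
          rw [pvCutoff, if_neg hpos, hdflt]]
      rw [pvScan, if_pos (by omega), if_neg hne, ih (i + 1) b' ans (by omega)]
      rw [pvG, if_pos hc, hb1]
    · have hbm : b' = b - 1 := by rw [hb', if_neg hc]; ring
      by_cases h0 : b = 0
      · have hneg : b' < 0 := by omega
        rw [show (pvCutoff (b' :: pvBalances rest b') i (i + ((c :: rest).length : Int))) = i from by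
          rw [pvCutoff, if_pos hneg]]
        rw [pvScan, if_neg (lt_irrefl i)]
        rw [pvG, if_neg hc, if_pos h0]
      · have hpos : ¬ b' < 0 := by omega
        have hcut : i + 1 ≤ pvCutoff (pvBalances rest b') (i + 1)
            ((i + 1) + (rest.length : Int)) := by
          have := pvCutoff_ge (pvBalances rest b') (i + 1)
          rwa [pvBalances_length] at this
        rw [show (pvCutoff (b' :: pvBalances rest b') i (i + ((c :: rest).length : Int)))
              = pvCutoff (pvBalances rest b') (i + 1) ((i + 1) + (rest.length : Int)) from by
            rw [pvCutoff, if_neg hpos, hdflt]]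
        rw [pvScan, if_pos (by omega)]
        by_cases hz : b' = 0
        · rw [if_pos hz, ih (i + 1) b' (i + 1) (by omega)]
          rw [pvG, if_neg hc, if_neg h0, if_pos (by omega : b - 1 = 0)]
          rw [hz] at hbm
          rw [← hbm, hz]
        · rw [if_neg hz, ih (i + 1) b' ans (by omega)]
          rw [pvG, if_neg hc, if_neg h0, if_neg (by omega : ¬ b - 1 = 0), ← hbm]

-- ===== VERDICT (by name: the statement is the Claim_ definition above) =====
theorem helper_spec : Claim_equal_helper := by
  intro expression _
  unfold Spec_helper helper helper_alt
  rw [helperLoopA_eq_pvG]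
  have := altSide_eq_pvG expression.toList 0 0 0 le_rfl
  simpa using this.symm
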